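-- pv_equiv track=rewrite | github.com/ShirleyRuo/Crawler | src/PageParse/JabPageParser/JabTagMapping.py | _tag_filter
-- ===== SOURCE A (Python) =====
-- from typing import Dict, Optional, Union, List
--
-- def _tag_filter(standard_tag_mapping : Dict[str, Dict[str, str]]) -> Dict[str, Dict[str, str]]:
--     del_tag_titles = []
--     for tag_title in standard_tag_mapping.keys():
--         if standard_tag_mapping[tag_title] == {}:
--             del_tag_titles.append(tag_title)
--     for tag_title in del_tag_titles:
--         del standard_tag_mapping[tag_title]
--     return standard_tag_mapping
-- ===== SOURCE B (Python) =====
-- def _tag_filter(standard_tag_mapping):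
--     while True:
--         empty_key = next((k for k, v in standard_tag_mapping.items() if v == {}), None)
--         if empty_key is None:
--             return standard_tag_mapping
--         del standard_tag_mapping[empty_key]
-- ===== Notes on version B (the rewrite author's own statement) =====
-- stated objective: alternative
-- what changed: Replaces A's single-scan collect-all-keys-then-delete strategy with a fixpoint loop that rescans the dict, deletes only the first empty-valued key found, and repeats until no empty value remains (one deletion per scan instead of one batch of deletions after one scan).
import Mathlib
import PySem

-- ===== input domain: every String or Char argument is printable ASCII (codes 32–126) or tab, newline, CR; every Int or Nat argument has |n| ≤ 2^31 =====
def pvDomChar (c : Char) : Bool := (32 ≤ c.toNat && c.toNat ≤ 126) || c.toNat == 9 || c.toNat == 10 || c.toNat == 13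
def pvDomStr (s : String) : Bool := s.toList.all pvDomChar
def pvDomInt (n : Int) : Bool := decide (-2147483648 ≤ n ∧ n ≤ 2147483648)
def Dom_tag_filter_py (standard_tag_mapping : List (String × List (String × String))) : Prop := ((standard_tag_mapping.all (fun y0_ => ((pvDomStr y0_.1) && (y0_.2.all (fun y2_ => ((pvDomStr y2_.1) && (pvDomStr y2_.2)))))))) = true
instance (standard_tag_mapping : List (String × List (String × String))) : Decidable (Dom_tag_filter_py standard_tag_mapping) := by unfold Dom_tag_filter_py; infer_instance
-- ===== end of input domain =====

-- B replaces A's collect-all-then-batch-delete with a fixpoint loop deleting one empty-valued key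
-- per rescan until none remain; both mutate the dict in place in Python, the equivalence here is
-- about the returned value.

-- ===== PORT A =====
def tag_filter_py (standard_tag_mapping : List (String × List (String × String))) : List (String × List (String × String)) :=
  let d : PySem.Dict String (List (String × String)) := ⟨standard_tag_mapping⟩
  -- first loop: collect keys whose value == {}
  let del_tag_titles := d.keys.foldl
    (fun acc tag_title => if d.get? tag_title == some [] then acc ++ [tag_title] else acc) []
  -- second loop: delete each collected key
  (del_tag_titles.foldl (fun dd tag_title => dd.erase tag_title) d).items

-- ===== PORT B =====
-- next((k for k, v in d.items() if v == {}), None): first key with empty value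
def findEmptyKey : List (String × List (String × String)) → Option String
  | [] => none
  | (k, v) :: t => if v == [] then some k else findEmptyKey t

lemma findEmptyKey_some_mem {m : List (String × List (String × String))} {k : String}
    (h : findEmptyKey m = some k) : (k, ([] : List (String × String))) ∈ m := by
  induction m with
  | nil => simp [findEmptyKey] at h
  | cons p t ih =>
    obtain ⟨k', v⟩ := p
    by_cases hv : v = []
    · subst hv
      simp [findEmptyKey] at h
      simp [h]
    · have hv' : (v == []) = false := by simpa using hv
      rw [findEmptyKey, if_neg (by simp [hv])] at h
      exact List.mem_cons_of_mem _ (ih h)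

lemma erase_items_length_lt (d : PySem.Dict String (List (String × String))) (k : String)
    (h : findEmptyKey d.items = some k) : (d.erase k).items.length < d.items.length := by
  have hmem := findEmptyKey_some_mem h
  rw [show (d.erase k).items = d.items.filter (fun p => !(p.1 == k)) from rfl]
  refine List.length_filter_lt_length_iff_exists.mpr ⟨(k, []), hmem, by simp⟩

-- the while-True loop: delete the first empty-valued key, repeat until there is none
def tagFilterLoop (d : PySem.Dict String (List (String × String))) :
    PySem.Dict String (List (String × String)) :=
  match h : findEmptyKey d.items with
  | none => d
  | some k => tagFilterLoop (d.erase k)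
termination_by d.items.length
decreasing_by exact erase_items_length_lt d k h

def tag_filter_py_alt (standard_tag_mapping : List (String × List (String × String))) : List (String × List (String × String)) :=
  (tagFilterLoop ⟨standard_tag_mapping⟩).items

-- ===== PRECONDITION & SPEC =====
-- The argument is a Python dict, so its association-list encoding has pairwise distinct keys;
-- Pre_ states exactly that (a list with duplicate keys encodes no Python input of this function).
def Pre_tag_filter_py (standard_tag_mapping : List (String × List (String × String))) : Prop :=
  (standard_tag_mapping.map Prod.fst).Nodup
instance (standard_tag_mapping : List (String × List (String × String))) : Decidable (Pre_tag_filter_py standard_tag_mapping) := by unfold Pre_tag_filter_py; infer_instance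
def pvWitness_tag_filter_py : (List (String × List (String × String))) :=
  [("a", []), ("b", [("x", "y")]), ("c", [])]

def Spec_tag_filter_py (standard_tag_mapping : List (String × List (String × String))) (out : List (String × List (String × String))) : Prop := out = tag_filter_py_alt standard_tag_mapping
instance (standard_tag_mapping : List (String × List (String × String))) (out : List (String × List (String × String))) : Decidable (Spec_tag_filter_py standard_tag_mapping out) := by unfold Spec_tag_filter_py; infer_instance

-- ===== CLAIM (what is proved, stated in full; the proofs are below) =====
def Claim_equal_tag_filter_py : Prop := ∀ (standard_tag_mapping : List (String × List (String × String))), Dom_tag_filter_py standard_tag_mapping → Pre_tag_filter_py standard_tag_mapping → Spec_tag_filter_py standard_tag_mapping (tag_filter_py standard_tag_mapping)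

-- ===== LEMMAS AND PROOFS =====

lemma findEmptyKey_none {m : List (String × List (String × String))}
    (h : findEmptyKey m = none) : ∀ p ∈ m, (p.2 == []) = false := by
  induction m with
  | nil => simp
  | cons p t ih =>
    obtain ⟨k, v⟩ := p
    by_cases hv : (v == []) = true
    · rw [findEmptyKey, if_pos hv] at h; exact absurd h (by simp)
    · rw [findEmptyKey, if_neg hv] at h
      intro q hq
      rcases List.mem_cons.mp hq with rfl | hq
      · simpa using hv
      · exact ih h q hq

-- B's loop computes the filter of the items by "value nonempty" (under distinct keys)
lemma tagFilterLoop_items (d : PySem.Dict String (List (String × String)))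
    (hnd : d.keys.Nodup) :
    (tagFilterLoop d).items = d.items.filter (fun p => !(p.2 == [])) := by
  induction d using tagFilterLoop.induct with
  | case1 d h =>
    rw [tagFilterLoop]
    split
    · exact (List.filter_eq_self.mpr (by intro p hp; simpa using findEmptyKey_none h p hp)).symm
    · rename_i k h'; rw [h] at h'; exact absurd h' (by simp)
  | case2 d k h ih =>
    have hmem := findEmptyKey_some_mem h
    have herase : (d.erase k).items = d.items.filter (fun p => !(p.1 == k)) := rfl
    have hnd' : (d.erase k).keys.Nodup := by
      have : (d.erase k).keys = (d.items.filter (fun p => !(p.1 == k))).map Prod.fst := by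
        rw [show (d.erase k).keys = (d.erase k).items.map Prod.fst from rfl, herase]
      rw [this]
      exact hnd.sublist ((d.items.filter_sublist (p := fun p => !(p.1 == k))).map Prod.fst)
    rw [tagFilterLoop]
    split
    · rename_i h'; rw [h] at h'; exact absurd h' (by simp)
    · rename_i k' h'
      rw [h] at h'
      injection h' with hk; subst hk
      rw [ih hnd', herase, List.filter_filter]
      apply List.filter_congr
      intro p hp
      by_cases hp2 : p.2 = []
      · simp [hp2]
      · have hne : p.1 ≠ k := by
          intro hk
          have h1 : d.get? p.1 = some p.2 := PySem.Dict.get?_of_mem_items d hp hnd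
          have h2 : d.get? k = some [] := PySem.Dict.get?_of_mem_items d hmem hnd
          rw [hk, h2] at h1
          exact hp2 (by simpa using h1.symm)
        simp [hne, hp2]

-- folding `erase` over a key list filters the items by "key not in the list"
lemma foldl_erase_items (ks : List String) (m : List (String × List (String × String))) :
    (ks.foldl (fun dd k => dd.erase k) (⟨m⟩ : PySem.Dict String (List (String × String)))).items
      = m.filter (fun p => ks.all (fun k => !(p.1 == k))) := by
  induction ks generalizing m with
  | nil => simp
  | cons k ks ih =>
    rw [List.foldl_cons,
      show (⟨m⟩ : PySem.Dict String (List (String × String))).erase k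
        = ⟨m.filter (fun p => !(p.1 == k))⟩ from rfl,
      ih, List.filter_filter]
    apply List.filter_congr
    intro p _
    simp [Bool.and_comm]

-- A computes the same filter of the items
lemma tag_filter_py_eq_filter (m : List (String × List (String × String)))
    (hnd : (m.map Prod.fst).Nodup) :
    tag_filter_py m = m.filter (fun p => !(p.2 == [])) := by
  unfold tag_filter_py
  dsimp only
  set d : PySem.Dict String (List (String × String)) := ⟨m⟩ with hd
  have hkeys : d.keys = m.map Prod.fst := rfl
  rw [PySem.List.foldl_append_if, foldl_erase_items]
  simp only [List.nil_append, List.map_id']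
  apply List.filter_congr
  intro p hp
  have hget : d.get? p.1 = some p.2 := by
    have : (p.1, p.2) ∈ d.items := by simpa [hd] using hp
    exact PySem.Dict.get?_of_mem_items d this hnd
  by_cases hp2 : p.2 = []
  · have hmem : p.1 ∈ (d.keys.filter (fun k => d.get? k == some [])) := by
      rw [List.mem_filter, hkeys]
      exact ⟨List.mem_map_of_mem hp, by simp [hget, hp2]⟩
    simp only [hp2, beq_self_eq_true, Bool.not_true]
    rw [List.all_eq_false.mpr ⟨p.1, hmem, by simp⟩]
  · have hne : (p.2 == []) = false := by simpa using hp2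
    rw [hne, Bool.not_false, List.all_eq_true.mpr]
    intro k hk
    rw [List.mem_filter] at hk
    have : d.get? k = some [] := by simpa using hk.2
    have hkne : p.1 ≠ k := by
      intro h; rw [← h, hget] at this; exact hp2 (by simpa using this)
    simpa using hkne

-- ===== VERDICT (by name: the statement is the Claim_ definition above) =====
theorem tag_filter_py_spec : Claim_equal_tag_filter_py := by
  intro m _ hpre
  show tag_filter_py m = tag_filter_py_alt m
  rw [tag_filter_py_eq_filter m hpre]
  exact (tagFilterLoop_items ⟨m⟩ hpre).symm
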